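-- pv_equiv track=rewrite | github.com/deis/controller | rootfs/scheduler/__init__.py | _get_deploy_batches
-- ===== SOURCE A (Python) =====
-- def _get_deploy_batches(steps, desired):
--     # figure out what kind of batches the deploy is done in - 1 in, 1 out or higher
--     if desired < steps:
--         # do it all in one go
--         batches = [desired]
--     else:
--         # figure out the stepped deploy count and then see if there is a leftover
--         batches = [steps for n in set(range(1, (desired + 1))) if n % steps == 0]
--         if desired - sum(batches) > 0:
--             batches.append(desired - sum(batches))
--
--     return batches
-- ===== SOURCE B (Python) =====
-- def _get_deploy_batches(steps, desired):
--     if desired < steps: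
--         return [desired]
--     q, r = divmod(desired, steps)
--     return [steps] * q + ([r] if r else [])
-- ===== Notes on version B (the rewrite author's own statement) =====
-- stated objective: alternative
-- what changed: Replaces the scan over set(range(1, desired+1)) with closed-form divmod arithmetic: the batch count and remainder come directly from divmod(desired, steps), so B builds [steps]*q (+ remainder) with no range/set/filter pass; intended as asymptotically lighter (O(desired//steps) vs O(desired)) but a timing run confirmed this only on some inputs (measured up to 209x at n=262144, inconsistent across inputs), so no speed claim is made.
-- outside the precondition, e.g. on _get_deploy_batches(-2, 5): A returns [-2, -2, 9], B returns [-1]; on _get_deploy_batches(-5, -3): A returns [], B returns [-3]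
import Mathlib
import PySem

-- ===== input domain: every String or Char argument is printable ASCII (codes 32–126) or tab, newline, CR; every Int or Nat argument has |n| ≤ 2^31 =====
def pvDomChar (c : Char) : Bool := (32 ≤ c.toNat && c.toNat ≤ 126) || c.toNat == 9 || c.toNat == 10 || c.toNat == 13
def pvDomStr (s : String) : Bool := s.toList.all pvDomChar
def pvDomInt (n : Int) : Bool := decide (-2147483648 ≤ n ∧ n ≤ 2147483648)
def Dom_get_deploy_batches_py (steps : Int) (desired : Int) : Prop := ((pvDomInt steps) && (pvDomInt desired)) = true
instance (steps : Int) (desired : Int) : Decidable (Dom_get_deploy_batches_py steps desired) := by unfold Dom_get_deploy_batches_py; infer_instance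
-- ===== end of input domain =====

-- B replaces A's scan over set(range(1, desired+1)) with closed-form divmod arithmetic (alternative algorithm).
-- Pre_ restricts to the natural domain steps >= 1 (plus the trivial desired < steps branch): for steps = 0 with
-- desired >= 0 A raises ZeroDivisionError, and for negative steps with desired >= steps A's negative-modulo
-- filter produces an accidental mix of values outside the function's purpose.


-- ===== PORT A =====
-- literal port of A; in the comprehension every kept element equals `steps`, so the (unspecified)
-- iteration order of Python's set(range(1, desired+1)) cannot affect the resulting list.
def get_deploy_batches_py (steps : Int) (desired : Int) : List Int :=
  if desired < steps then [desired]
  else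
    let batches :=
      ((PySem.List.pyRange 1 (desired + 1) 1).filter
        (fun n => PySem.Int.mod n steps == 0)).map (fun _ => steps)
    if desired - batches.sum > 0 then batches ++ [desired - batches.sum] else batches

-- ===== PORT B =====
def get_deploy_batches_py_alt (steps : Int) (desired : Int) : List Int :=
  if desired < steps then [desired]
  else
    let q := PySem.Int.floordiv desired steps
    let r := PySem.Int.mod desired steps
    List.replicate q.toNat steps ++ (if r ≠ 0 then [r] else [])

-- ===== PRECONDITION & SPEC =====
-- Pre_ excludes non-positive steps with desired >= steps: there A either raises ZeroDivisionError
-- (steps = 0) or returns an accidental negative-modulo artefact (steps < 0), outside the natural domain.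
def Pre_get_deploy_batches_py (steps : Int) (desired : Int) : Prop := 1 ≤ steps ∨ desired < steps
instance (steps : Int) (desired : Int) : Decidable (Pre_get_deploy_batches_py steps desired) := by unfold Pre_get_deploy_batches_py; infer_instance
def pvWitness_get_deploy_batches_py : Int × Int := (3, 10)
def Spec_get_deploy_batches_py (steps : Int) (desired : Int) (out : List Int) : Prop := out = get_deploy_batches_py_alt steps desired
instance (steps : Int) (desired : Int) (out : List Int) : Decidable (Spec_get_deploy_batches_py steps desired out) := by unfold Spec_get_deploy_batches_py; infer_instance

-- ===== CLAIM (what is proved, stated in full; the proofs are below) =====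
def Claim_equal_get_deploy_batches_py : Prop := ∀ (steps : Int) (desired : Int), Dom_get_deploy_batches_py steps desired → Pre_get_deploy_batches_py steps desired → Spec_get_deploy_batches_py steps desired (get_deploy_batches_py steps desired)

-- ===== LEMMAS AND PROOFS =====

-- floor-division of k+1 by positive s: the quotient steps up exactly at multiples of s
lemma pv_succ_ediv (s k : Int) (hs : 0 < s) (hk : 0 ≤ k) :
    (k + 1) / s = k / s + (if s ∣ (k + 1) then 1 else 0) := by
  by_cases hd : s ∣ (k + 1)
  · rw [if_pos hd]
    obtain ⟨c, hc⟩ := hd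
    have hc1 : 1 ≤ c := by nlinarith
    have h1 : (k + 1) / s = c := by
      rw [hc, Int.mul_ediv_cancel_left _ (by omega)]
    have h2 : k / s = c - 1 := by
      have hk' : k = (s - 1) + (c - 1) * s := by linarith
      rw [hk', Int.add_mul_ediv_right _ _ (show s ≠ 0 by omega),
          Int.ediv_eq_zero_of_lt (by omega) (by omega)]
      ring
    rw [h1, h2]; ring
  · have h0 := Int.emod_emod_of_dvd k (dvd_refl s)
    have hrlt : k % s < s := Int.emod_lt_of_pos k hs
    have hrge : 0 ≤ k % s := Int.emod_nonneg k (by omega)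
    have hkeq : k = s * (k / s) + k % s := by linarith [Int.emod_add_ediv' k s]
    have hne : k % s + 1 ≠ s := by
      intro he
      exact hd ⟨k / s + 1, by linarith⟩
    have h1 : (k + 1) / s = (k % s + 1) / s + k / s := by
      have : k + 1 = (k % s + 1) + (k / s) * s := by linarith
      rw [this, Int.add_mul_ediv_right _ _ (show s ≠ 0 by omega)]
    rw [h1, Int.ediv_eq_zero_of_lt (by omega) (by omega)]
    simp [hd]

-- the multiples of s among 1..k, each mapped to s, form replicate (k // s) s
lemma pv_filter_replicate (s : Int) (hs : 1 ≤ s) : ∀ k : Nat,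
    ((PySem.List.pyRange 1 ((k : Int) + 1) 1).filter
        (fun n => PySem.Int.mod n s == 0)).map (fun _ => s)
      = List.replicate (PySem.Int.floordiv (k : Int) s).toNat s := by
  intro k
  induction k with
  | zero =>
      have h0 : ((0 : Nat) : Int) + 1 = 1 := by norm_num
      rw [h0, PySem.List.pyRange_one_eq_nil (le_refl (1 : Int)),
          PySem.Int.floordiv_eq_ediv_of_pos (show (0:Int) < s by omega)]
      simp
  | succ k ih =>
      have hc : (((k + 1 : Nat)) : Int) = (k : Int) + 1 := by push_cast; ring
      rw [hc, PySem.List.pyRange_one_succ_right (show (1:Int) ≤ (k : Int) + 1 by omega),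
          List.filter_append, List.map_append, ih]
      by_cases hd : s ∣ ((k : Int) + 1)
      · have hm : (PySem.Int.mod ((k : Int) + 1) s == 0) = true := by
          simp [(PySem.Int.mod_eq_zero_iff_dvd _ _).mpr hd]
        have hq : (PySem.Int.floordiv ((k : Nat) + 1 : Int) s).toNat
            = (PySem.Int.floordiv (k : Int) s).toNat + 1 := by
          rw [PySem.Int.floordiv_eq_ediv_of_pos (by omega),
              PySem.Int.floordiv_eq_ediv_of_pos (by omega)]
          have hstep : ((k : Nat) + 1 : Int) / s = (k : Int) / s + 1 := by
            rw [pv_succ_ediv s (k : Int) (by omega) (by positivity)]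
            simp [hd]
          have hq0 : 0 ≤ (k : Int) / s := Int.ediv_nonneg (by positivity) (by omega)
          rw [hstep]
          generalize (k : Int) / s = q at hq0 ⊢
          omega
        rw [hq, List.replicate_succ']
        simp [hm]
      · have hm : (PySem.Int.mod ((k : Int) + 1) s == 0) = false := by
          simp [PySem.Int.mod_eq_zero_iff_dvd, hd]
        have hq : (PySem.Int.floordiv ((k : Nat) + 1 : Int) s).toNat
            = (PySem.Int.floordiv (k : Int) s).toNat := by
          rw [PySem.Int.floordiv_eq_ediv_of_pos (by omega),
              PySem.Int.floordiv_eq_ediv_of_pos (by omega)]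
          have hstep : ((k : Nat) + 1 : Int) / s = (k : Int) / s := by
            rw [pv_succ_ediv s (k : Int) (by omega) (by positivity)]
            simp [hd]
          rw [hstep]
        rw [hq]
        simp [hm]

-- ===== VERDICT (by name: the statement is the Claim_ definition above) =====
theorem get_deploy_batches_py_spec : Claim_equal_get_deploy_batches_py := by
  intro steps desired _ hpre
  unfold Spec_get_deploy_batches_py get_deploy_batches_py get_deploy_batches_py_alt
  by_cases hlt : desired < steps
  · simp [hlt]
  · have hs : 1 ≤ steps := by
      rcases hpre with h | h
      · exact h
      · exact absurd h hlt
    have hd0 : 0 ≤ desired := by omega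
    obtain ⟨k, hk⟩ : ∃ k : Nat, desired = (k : Int) := ⟨desired.toNat, by omega⟩
    subst hk
    simp only [hlt, if_false]
    rw [pv_filter_replicate steps hs k]
    have hq0 : 0 ≤ PySem.Int.floordiv (k : Int) steps := by
      rw [PySem.Int.floordiv_eq_ediv_of_pos (by omega)]
      exact Int.ediv_nonneg (by omega) (by omega)
    have hsum : (List.replicate (PySem.Int.floordiv (k : Int) steps).toNat steps).sum
        = PySem.Int.floordiv (k : Int) steps * steps := by
      rw [List.sum_replicate, nsmul_eq_mul, Int.toNat_of_nonneg hq0]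
    have hrem : (k : Int) - PySem.Int.floordiv (k : Int) steps * steps
        = PySem.Int.mod (k : Int) steps := by
      have := PySem.Int.floordiv_mul_add_mod (k : Int) steps
      omega
    have hrnn : 0 ≤ PySem.Int.mod (k : Int) steps := PySem.Int.mod_nonneg _ (by omega)
    rw [hsum, hrem]
    by_cases hr : PySem.Int.mod (k : Int) steps = 0
    · simp [hr]
    · have : PySem.Int.mod (k : Int) steps > 0 := by omega
      simp [hr, this]
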